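-- pv_equiv track=rewrite | github.com/skogsbaer/check-assignments | src/testHaskell.py | massageTestOutput
-- ===== SOURCE A (Python) =====
-- def ignoreLine(line):
--     return line.startswith("Warning: Couldn't find a component for file target") or \
--         line.strip() == 'Attempting to load the file anyway.' or \
--         line.strip() == 'Configuring GHCi with the following packages:'
--
-- magicLine = "__START_TEST__"
--
-- def massageTestOutput(out):
--     after = None
--     out = out.replace('\r', '\n')
--     res = []
--     for line in out.split('\n'):
--         line = line.rstrip()
--         if after is not None:
--             after.append(line)
--         if line == magicLine:
--             after = []
--         if not ignoreLine(line):
--             res.append(line)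
--     if after is not None:
--         return after
--     else:
--         return res
-- ===== SOURCE B (Python) =====
-- def ignoreLine(line):
--     return line.startswith("Warning: Couldn't find a component for file target") or \
--         line.strip() == 'Attempting to load the file anyway.' or \
--         line.strip() == 'Configuring GHCi with the following packages:'
--
-- magicLine = "__START_TEST__"
--
-- def massageTestOutput(out):
--     lines = [l.rstrip() for l in out.replace('\r', '\n').split('\n')]
--     tail = []
--     for l in reversed(lines):
--         if l == magicLine:
--             return tail
--         tail = [l] + tail
--     return [l for l in lines if not ignoreLine(l)]
-- ===== Notes on version B (the rewrite author's own statement) =====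
-- stated objective: simpler
-- what changed: Replaces A's single forward pass that simultaneously maintains a post-marker accumulator and a filtered list with a decomposition: rstrip all lines once, scan the reversed list for the (originally last) magic marker and return the collected tail, otherwise filter out ignored lines.
import Mathlib
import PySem

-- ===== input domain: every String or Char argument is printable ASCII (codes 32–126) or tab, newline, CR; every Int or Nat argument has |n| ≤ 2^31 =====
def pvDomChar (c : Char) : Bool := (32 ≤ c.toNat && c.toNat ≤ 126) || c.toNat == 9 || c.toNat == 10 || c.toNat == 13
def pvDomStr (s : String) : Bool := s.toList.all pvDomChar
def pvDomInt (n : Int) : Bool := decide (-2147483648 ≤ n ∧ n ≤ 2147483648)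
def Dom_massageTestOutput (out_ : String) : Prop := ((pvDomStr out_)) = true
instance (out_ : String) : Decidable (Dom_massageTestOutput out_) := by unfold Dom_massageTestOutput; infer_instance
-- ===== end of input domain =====

-- B replaces A's single-pass after/res state machine by a reverse scan for the last magic line
-- (falling back to a filter when there is none): simpler decomposition, same cost.


-- ===== PORT A =====
def pvIgnoreLine (line : String) : Bool :=
  PySem.Str.startswith line "Warning: Couldn't find a component for file target" ||
  PySem.Str.strip line == "Attempting to load the file anyway." ||
  PySem.Str.strip line == "Configuring GHCi with the following packages:"

def pvMagicLine : String := "__START_TEST__"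

-- the loop body of A (line.rstrip(); append to `after` if active; reset `after` on the magic
-- line; append to `res` unless ignored)
def pvStepA (st : Option (List String) × List String) (rawLine : String) :
    Option (List String) × List String :=
  let line := PySem.Str.rstrip rawLine
  let after₁ : Option (List String) :=
    match st.1 with
    | some a => some (a ++ [line])
    | none => none
  let after₂ := if line == pvMagicLine then some [] else after₁
  let res := if pvIgnoreLine line then st.2 else st.2 ++ [line]
  (after₂, res)

def massageTestOutput (out_ : String) : List String :=
  let out := PySem.Str.replace out_ "\r" "\n"
  -- out.split('\n'): split? is none only for sep = "", and the sep here is the literal "\n"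
  let st := ((PySem.Str.split? out "\n").getD []).foldl pvStepA (none, [])
  match st.1 with
  | some after => after
  | none => st.2

-- ===== PORT B =====
-- B's reversed(lines) loop: walk the reversed list, return the accumulated tail at the first
-- (i.e. originally last) magic line, none if the loop finishes
def pvScanRev : List String → List String → Option (List String)
  | [], _ => none
  | l :: rest, tail => if l == pvMagicLine then some tail else pvScanRev rest (l :: tail)

def massageTestOutput_alt (out_ : String) : List String :=
  let lines := ((PySem.Str.split? (PySem.Str.replace out_ "\r" "\n") "\n").getD []).map
      PySem.Str.rstrip
  match pvScanRev lines.reverse [] with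
  | some tail => tail
  | none => lines.filter (fun l => !pvIgnoreLine l)

-- ===== PRECONDITION & SPEC =====
def Spec_massageTestOutput (out_ : String) (out : List String) : Prop := out = massageTestOutput_alt out_
instance (out_ : String) (out : List String) : Decidable (Spec_massageTestOutput out_ out) := by unfold Spec_massageTestOutput; infer_instance

-- ===== CLAIM (what is proved, stated in full; the proofs are below) =====
def Claim_equal_massageTestOutput : Prop := ∀ (out_ : String), Dom_massageTestOutput out_ → Spec_massageTestOutput out_ (massageTestOutput out_)

-- ===== LEMMAS AND PROOFS =====

-- A's step on an already-rstripped line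
def pvStep (st : Option (List String) × List String) (line : String) :
    Option (List String) × List String :=
  ((if line == pvMagicLine then some [] else
      match st.1 with
      | some a => some (a ++ [line])
      | none => none),
   if pvIgnoreLine line then st.2 else st.2 ++ [line])

-- the lines after the LAST occurrence of pvMagicLine, none if it does not occur
def pvLastTail : List String → Option (List String)
  | [] => none
  | x :: xs =>
    match pvLastTail xs with
    | some t => some t
    | none => if x == pvMagicLine then some xs else none

theorem pvStepA_eq (st : Option (List String) × List String) (raw : String) :
    pvStepA st raw = pvStep st (PySem.Str.rstrip raw) := by
  simp [pvStepA, pvStep]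

theorem pvFoldl_snd (ls : List String) (a : Option (List String)) (r : List String) :
    (ls.foldl pvStep (a, r)).2 = r ++ ls.filter (fun l => !pvIgnoreLine l) := by
  induction ls generalizing a r with
  | nil => simp
  | cons x ls ih =>
    simp only [List.foldl_cons, pvStep, List.filter_cons]
    by_cases h : pvIgnoreLine x = true <;> simp [h, ih]

theorem pvFoldl_fst (ls : List String) (a : Option (List String)) (r : List String) :
    (ls.foldl pvStep (a, r)).1 =
      match pvLastTail ls with
      | some t => some t
      | none => a.map (· ++ ls) := by
  induction ls generalizing a r with
  | nil => cases a <;> simp [pvLastTail]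
  | cons x ls ih =>
    simp only [List.foldl_cons]
    rw [ih]
    by_cases hx : x == pvMagicLine
    · cases hlt : pvLastTail ls with
      | some t => simp [pvLastTail, hlt]
      | none => simp [pvStep, pvLastTail, hlt, hx]
    · cases hlt : pvLastTail ls with
      | some t => simp [pvLastTail, hlt]
      | none =>
        cases a <;>
          simp [pvStep, pvLastTail, hlt, hx]

theorem pvLastTail_append (ls : List String) (x : String) :
    pvLastTail (ls ++ [x]) =
      if x == pvMagicLine then some [] else (pvLastTail ls).map (· ++ [x]) := by
  induction ls with
  | nil => simp [pvLastTail]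
  | cons y ls ih =>
    by_cases hx : x == pvMagicLine
    · simp only [List.cons_append, pvLastTail, ih, hx, if_pos]
    · simp only [List.cons_append, pvLastTail, ih, hx, if_neg, Bool.not_eq_true]
      cases hlt : pvLastTail ls with
      | some t => simp
      | none => by_cases hy : y == pvMagicLine <;> simp [hy]

theorem pvScanRev_reverse (ls : List String) (t : List String) :
    pvScanRev ls.reverse t = (pvLastTail ls).map (· ++ t) := by
  induction ls using List.reverseRecOn generalizing t with
  | nil => simp [pvScanRev, pvLastTail]
  | append_singleton ls x ih =>
    rw [List.reverse_append, pvLastTail_append]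
    by_cases hx : x == pvMagicLine
    · simp [pvScanRev, hx]
    · simp only [List.reverse_singleton, List.singleton_append, pvScanRev, hx,
        Bool.false_eq_true, if_false, ih]
      cases pvLastTail ls <;> simp

-- ===== VERDICT (by name: the statement is the Claim_ definition above) =====
theorem massageTestOutput_spec : Claim_equal_massageTestOutput := by
  intro out_ _
  unfold Spec_massageTestOutput massageTestOutput massageTestOutput_alt
  simp only []
  set raws := (PySem.Str.split? (PySem.Str.replace out_ "\r" "\n") "\n").getD [] with hraws
  have hfold : raws.foldl pvStepA (none, []) =
      (raws.map PySem.Str.rstrip).foldl pvStep (none, []) := by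
    have hfun : pvStepA = fun st l => pvStep st (PySem.Str.rstrip l) :=
      funext fun st => funext fun l => pvStepA_eq st l
    rw [List.foldl_map, hfun]
  set lines := raws.map PySem.Str.rstrip with hlines
  rw [hfold, pvScanRev_reverse]
  rw [pvFoldl_fst lines none []]
  cases hlt : pvLastTail lines with
  | some t => simp
  | none => simp [pvFoldl_snd lines none []]
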